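-- pv_equiv track=rewrite | github.com/Forkxz/DQN_Q_Control | environment.py | mg_config
-- ===== SOURCE A (Python) =====
-- def mg_config(x,dim):
--     if dim>1:
--         Y=[]
--         for ii in range(2):
--             for xx in x:
--                 y=xx+[ii]
--                 Y.append(y)
--         Y=mg_config(Y,dim-1)
--     else:
--         Y=x
--     return Y
-- ===== SOURCE B (Python) =====
-- def mg_config(x, dim):
--     Y = x
--     for _ in range(dim - 1):
--         Y = [y + [i] for i in range(2) for y in Y]
--     return Y
-- ===== Notes on version B (the rewrite author's own statement) =====
-- stated objective: simpler
-- what changed: The counter-driven recursion is replaced by an explicit loop that performs dim-1 doublings in place, each doubling written as a single comprehension instead of nested append loops building a fresh list passed into a recursive call.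
import Mathlib
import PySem

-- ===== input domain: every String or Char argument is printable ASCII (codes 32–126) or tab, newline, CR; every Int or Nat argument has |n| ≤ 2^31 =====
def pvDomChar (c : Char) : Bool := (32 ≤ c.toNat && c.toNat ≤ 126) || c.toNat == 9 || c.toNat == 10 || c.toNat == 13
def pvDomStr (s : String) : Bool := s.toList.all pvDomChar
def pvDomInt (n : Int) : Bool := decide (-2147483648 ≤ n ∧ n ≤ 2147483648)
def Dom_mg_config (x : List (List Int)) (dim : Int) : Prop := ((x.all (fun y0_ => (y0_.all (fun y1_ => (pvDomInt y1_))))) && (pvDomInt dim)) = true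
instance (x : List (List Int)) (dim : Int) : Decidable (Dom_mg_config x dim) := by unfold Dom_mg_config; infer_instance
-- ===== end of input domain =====

-- B replaces A's recursion with an explicit loop of dim-1 doublings; return value only.
-- ===== PORT A =====
def mg_config (x : List (List Int)) (dim : Int) : List (List Int) :=
  if h : dim > 1 then
    mg_config
      ((PySem.List.pyRange 0 2 1).foldl
        (fun Y ii => x.foldl (fun Y2 xx => Y2 ++ [xx ++ [ii]]) Y) [])
      (dim - 1)
  else x
termination_by (dim - 1).toNat
decreasing_by omega

-- ===== PORT B =====
def mg_config_alt (x : List (List Int)) (dim : Int) : List (List Int) :=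
  (PySem.List.pyRange 0 (dim - 1) 1).foldl
    (fun Y _ =>
      (PySem.List.pyRange 0 2 1).foldl
        (fun acc i => acc ++ Y.map (fun y => y ++ [i])) [])
    x

-- ===== PRECONDITION & SPEC =====
def Spec_mg_config (x : List (List Int)) (dim : Int) (out : List (List Int)) : Prop := out = mg_config_alt x dim
instance (x : List (List Int)) (dim : Int) (out : List (List Int)) : Decidable (Spec_mg_config x dim out) := by unfold Spec_mg_config; infer_instance

-- ===== CLAIM (what is proved, stated in full; the proofs are below) =====
def Claim_equal_mg_config : Prop := ∀ (x : List (List Int)) (dim : Int), Dom_mg_config x dim → Spec_mg_config x dim (mg_config x dim)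

-- ===== LEMMAS AND PROOFS =====

-- the single doubling step as B computes it
def pvStep (Y : List (List Int)) : List (List Int) :=
  (PySem.List.pyRange 0 2 1).foldl
    (fun acc i => acc ++ Y.map (fun y => y ++ [i])) []

theorem pv_inner_foldl (ii : Int) : ∀ (x : List (List Int)) (Y : List (List Int)),
    x.foldl (fun Y2 xx => Y2 ++ [xx ++ [ii]]) Y = Y ++ x.map (fun xx => xx ++ [ii]) := by
  intro x
  induction x with
  | nil => simp [List.foldl]
  | cons h t ih => intro Y; simp [List.foldl, ih]

theorem pv_stepA_eq (x : List (List Int)) :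
    (PySem.List.pyRange 0 2 1).foldl
      (fun Y ii => x.foldl (fun Y2 xx => Y2 ++ [xx ++ [ii]]) Y) [] = pvStep x := by
  have h2 : PySem.List.pyRange 0 2 1 = [0, 1] := by decide
  simp only [pvStep, h2, List.foldl]
  rw [pv_inner_foldl, pv_inner_foldl]

theorem pv_foldl_const {α β : Type} (g : α → α) :
    ∀ (l : List β) (i : α), l.foldl (fun a _ => g a) i = g^[l.length] i := by
  intro l
  induction l with
  | nil => simp
  | cons h t ih => intro i; simp [List.foldl, ih, Function.iterate_succ_apply]

theorem pv_alt_iter (x : List (List Int)) (dim : Int) :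
    mg_config_alt x dim = pvStep^[(dim - 1).toNat] x := by
  refine (pv_foldl_const pvStep (PySem.List.pyRange 0 (dim - 1) 1) x).trans ?_
  simp [PySem.List.length_pyRange_one]

theorem pv_A_iter : ∀ (n : Nat) (x : List (List Int)) (dim : Int),
    (dim - 1).toNat = n → mg_config x dim = pvStep^[n] x := by
  intro n
  induction n with
  | zero =>
    intro x dim h
    rw [mg_config]
    have : ¬ dim > 1 := by omega
    simp [this]
  | succ k ih =>
    intro x dim h
    rw [mg_config]
    have hd : dim > 1 := by omega
    simp only [hd, dif_pos]
    rw [pv_stepA_eq, ih _ (dim - 1) (by omega), ← Function.iterate_succ_apply]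

-- ===== VERDICT (by name: the statement is the Claim_ definition above) =====
theorem mg_config_spec : Claim_equal_mg_config := by
  intro x dim _
  unfold Spec_mg_config
  rw [pv_alt_iter, pv_A_iter _ x dim rfl]
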